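-- pv_equiv track=rewrite | github.com/sansarip/IPH | IPH.py | IP_Formatter
-- ===== SOURCE A (Python) =====
-- def IP_Formatter(ipList): #checks if public IP
--     ipFormatList = []
--     octet = ''
--     index = -1
--     for i in ipList:
--         index +=1
--         if i != '.':
--             octet += str(i)
--         if i == '.':
--             ipFormatList.append(octet)
--             octet = ''
--             ipFormatList.append(i)
--         if index+1 == len(ipList): #appends the last octet
--             ipFormatList.append(octet)
--     return ipFormatList
-- ===== SOURCE B (Python) =====
-- def IP_Formatter(ipList):
--     if not ipList:
--         return []
--     groups = []
--     cur = ''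
--     for i in ipList:
--         if i == '.':
--             groups.append(cur)
--             cur = ''
--         else:
--             cur += str(i)
--     groups.append(cur)
--     out = [groups[0]]
--     for g in groups[1:]:
--         out.append('.')
--         out.append(g)
--     return out
-- ===== Notes on version B (the rewrite author's own statement) =====
-- stated objective: simpler
-- what changed: B recursively splits the list into dot-separated groups and then interleaves '.' between them, instead of A's single pass with a character-accumulator, manual index counter and a last-element check.
import Mathlib
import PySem

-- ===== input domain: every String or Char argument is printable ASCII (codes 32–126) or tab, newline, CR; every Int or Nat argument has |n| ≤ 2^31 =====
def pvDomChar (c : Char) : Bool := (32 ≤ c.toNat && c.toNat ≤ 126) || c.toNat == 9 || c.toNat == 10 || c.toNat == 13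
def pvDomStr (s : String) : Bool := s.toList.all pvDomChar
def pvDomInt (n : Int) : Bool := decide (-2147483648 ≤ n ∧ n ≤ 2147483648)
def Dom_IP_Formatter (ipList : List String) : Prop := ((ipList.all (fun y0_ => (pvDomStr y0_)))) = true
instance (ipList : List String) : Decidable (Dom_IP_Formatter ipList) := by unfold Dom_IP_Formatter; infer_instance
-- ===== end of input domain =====

-- B replaces A's one-pass accumulator-with-index loop by a group-split pass plus a dot-interleave pass (same cost, plainer shape).

-- ===== PORT A =====
-- one loop step of A: index += 1; the three ifs in order (the last fires only on the final element)
def pvStepA (total : Int) (st : List String × String × Int) (i : String) : List String × String × Int :=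
  let index := st.2.2 + 1
  let octet := if i ≠ "." then st.2.1 ++ i else st.2.1
  let p := if i = "." then (st.1 ++ [st.2.1, i], "") else (st.1, octet)
  let acc := if index + 1 = total then p.1 ++ [p.2] else p.1
  (acc, p.2, index)

def IP_Formatter (ipList : List String) : List String :=
  (ipList.foldl (pvStepA (ipList.length : Int)) ([], "", -1)).1

-- ===== PORT B =====
-- port of Source B: first loop collects the dot-separated groups, second loop interleaves "." between them
def IP_Formatter_alt (ipList : List String) : List String :=
  if ipList = [] then [] else
    let st := ipList.foldl
      (fun (st : List String × String) i =>
        if i = "." then (st.1 ++ [st.2], "") else (st.1, st.2 ++ i)) ([], "")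
    let groups := st.1 ++ [st.2]
    match groups with
    | [] => []
    | g :: rest => rest.foldl (fun out g => out ++ [".", g]) [g]

-- ===== PRECONDITION & SPEC =====
def Spec_IP_Formatter (ipList : List String) (out : List String) : Prop := out = IP_Formatter_alt ipList
instance (ipList : List String) (out : List String) : Decidable (Spec_IP_Formatter ipList out) := by unfold Spec_IP_Formatter; infer_instance

-- ===== CLAIM (what is proved, stated in full; the proofs are below) =====
def Claim_equal_IP_Formatter : Prop := ∀ (ipList : List String), Dom_IP_Formatter ipList → Spec_IP_Formatter ipList (IP_Formatter ipList)

-- ===== LEMMAS AND PROOFS =====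

-- proof-only recursive characterisations of B's two loops
def pvGroups : List String → String → List String
  | [], cur => [cur]
  | i :: rest, cur => if i = "." then cur :: pvGroups rest "" else pvGroups rest (cur ++ i)

def pvJoinDots : List String → List String
  | [] => []
  | [g] => [g]
  | g :: h :: rest => g :: "." :: pvJoinDots (h :: rest)

theorem pvJoinDots_cons (g : String) (gs : List String) (h : gs ≠ []) :
    pvJoinDots (g :: gs) = g :: "." :: pvJoinDots gs := by
  cases gs with
  | nil => exact absurd rfl h
  | cons h t => rfl

theorem pvGroups_ne_nil (l : List String) (cur : String) : pvGroups l cur ≠ [] := by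
  induction l generalizing cur with
  | nil => simp [pvGroups]
  | cons i rest ih => simp only [pvGroups]; split <;> simp [ih]

-- B's first loop computes pvGroups
theorem pvGroupsFold (l : List String) :
    ∀ (acc : List String) (cur : String),
    (l.foldl (fun (st : List String × String) i =>
        if i = "." then (st.1 ++ [st.2], "") else (st.1, st.2 ++ i)) (acc, cur)).1
      ++ [(l.foldl (fun (st : List String × String) i =>
        if i = "." then (st.1 ++ [st.2], "") else (st.1, st.2 ++ i)) (acc, cur)).2]
      = acc ++ pvGroups l cur := by
  induction l with
  | nil => intro acc cur; simp [pvGroups]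
  | cons i rest ih =>
    intro acc cur
    by_cases hd : i = "."
    · subst hd
      simp only [List.foldl_cons, pvGroups, if_true]
      rw [ih (acc ++ [cur]) ""]
      simp
    · simp only [List.foldl_cons, pvGroups, if_neg hd]
      rw [ih acc (cur ++ i)]

theorem pvJoinFold (rest : List String) :
    ∀ (out : List String),
    rest.foldl (fun out g => out ++ [".", g]) out = out ++ rest.flatMap (fun g => [".", g]) := by
  induction rest with
  | nil => intro out; simp
  | cons g t ih => intro out; simp only [List.foldl_cons, List.flatMap_cons]; rw [ih]; simp

theorem pvJoinDots_flatMap (gs : List String) (g : String) :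
    pvJoinDots (g :: gs) = g :: gs.flatMap (fun x => [".", x]) := by
  induction gs generalizing g with
  | nil => simp [pvJoinDots]
  | cons h t ih =>
    rw [pvJoinDots_cons g (h :: t) (by simp), ih h]
    simp

-- B's port equals the recursive characterisation on nonempty input
theorem pvAlt_eq (ipList : List String) (h : ipList ≠ []) :
    IP_Formatter_alt ipList = pvJoinDots (pvGroups ipList "") := by
  unfold IP_Formatter_alt
  rw [if_neg h]
  have hg := pvGroupsFold ipList [] ""
  simp only [List.nil_append] at hg
  cases hgs : pvGroups ipList "" with
  | nil => exact absurd hgs (pvGroups_ne_nil ipList "")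
  | cons g rest =>
    rw [hgs] at hg
    simp only [hg]
    rw [pvJoinFold rest [g], pvJoinDots_flatMap rest g]
    simp

theorem pvStepA_dot (total : Int) (acc : List String) (octet : String) (idx : Int)
    (h : ¬ idx + 1 + 1 = total) :
    pvStepA total (acc, octet, idx) "." = (acc ++ [octet, "."], "", idx + 1) := by
  simp [pvStepA, h]

theorem pvStepA_nondot (total : Int) (acc : List String) (octet : String) (idx : Int)
    (i : String) (hd : i ≠ ".") (h : ¬ idx + 1 + 1 = total) :
    pvStepA total (acc, octet, idx) i = (acc, octet ++ i, idx + 1) := by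
  simp [pvStepA, h, hd]

-- loop invariant: from a mid-loop state, A's fold yields acc ++ the dot-interleaved groups of the rest seeded with the current octet
theorem pvLoopA (total : Int) (rest : List String) :
    ∀ (acc : List String) (octet : String) (idx : Int),
    rest ≠ [] → idx + 1 + (rest.length : Int) = total →
    (List.foldl (pvStepA total) (acc, octet, idx) rest).1
      = acc ++ pvJoinDots (pvGroups rest octet) := by
  induction rest with
  | nil => intro _ _ _ h; exact absurd rfl h
  | cons i rest ih =>
    intro acc octet idx _ hlen
    cases hrest : rest with
    | nil =>
      subst hrest
      have hlast : idx + 1 + 1 = total := by simp at hlen; omega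
      by_cases hd : i = "."
      · subst hd
        simp [List.foldl, pvStepA, hlast, pvGroups, pvJoinDots]
      · simp [List.foldl, pvStepA, hlast, hd, pvGroups, pvJoinDots]
    | cons j t =>
      have hne : rest ≠ [] := by rw [hrest]; simp
      have hnot : ¬ (idx + 1 + 1 = total) := by
        rw [hrest] at hlen; simp only [List.length_cons] at hlen; push_cast at hlen; omega
      have hlen' : idx + 1 + 1 + (rest.length : Int) = total := by
        simp only [List.length_cons] at hlen; push_cast at hlen ⊢; omega
      rw [← hrest]
      by_cases hd : i = "."
      · subst hd
        rw [List.foldl_cons, pvStepA_dot total acc octet idx hnot,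
            ih (acc ++ [octet, "."]) "" (idx + 1) hne hlen']
        have hg : pvGroups ("." :: rest) octet = octet :: pvGroups rest "" := by
          simp [pvGroups]
        rw [hg, pvJoinDots_cons octet (pvGroups rest "") (pvGroups_ne_nil rest "")]
        simp
      · rw [List.foldl_cons, pvStepA_nondot total acc octet idx i hd hnot,
            ih acc (octet ++ i) (idx + 1) hne hlen']
        simp [pvGroups, hd]

-- ===== VERDICT (by name: the statement is the Claim_ definition above) =====
theorem IP_Formatter_spec : Claim_equal_IP_Formatter := by
  intro ipList _
  unfold Spec_IP_Formatter IP_Formatter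
  cases h : ipList with
  | nil => simp [IP_Formatter_alt]
  | cons i rest =>
    rw [pvAlt_eq (i :: rest) (by simp)]
    exact pvLoopA ((i :: rest).length : Int) (i :: rest) [] "" (-1) (by simp)
      (by simp only [List.length_cons]; push_cast; omega)
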